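-- pv_equiv track=rewrite | github.com/hermmanhender/eprllib | tools/tools.py | transformin_central_binary_action
-- ===== SOURCE A (Python) =====
-- def transformin_central_binary_action(central_action, agents_ids):
--     """_summary_
--
--     Args:
--         central_action (_type_): _description_
--         agents_ids (_type_): _description_
--
--     Returns:
--         _type_: _description_
--     """
--     modulos = [] # la lista para guardar los módulos
--     while central_action != 0: # mientras el número de entrada sea diferente de cero
--         # paso 1: dividimos entre 2
--         modulo = central_action % 2
--         cociente = central_action // 2
--         modulos.append(modulo) # guardamos el módulo calculado
--         central_action = cociente # el cociente pasa a ser el número de entrada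
--     while len(modulos) < len(agents_ids):
--         modulos.append(0)
--     return dict(zip(agents_ids,modulos))
-- ===== SOURCE B (Python) =====
-- def transformin_central_binary_action(central_action, agents_ids):
--     # Each agent's bit computed directly by position: bit i of central_action.
--     return {aid: (central_action >> i) % 2 for i, aid in enumerate(agents_ids)}
-- ===== Notes on version B (the rewrite author's own statement) =====
-- stated objective: idiomatic
-- what changed: Replaces the divide-by-2 remainder-accumulating loop plus separate zero-padding loop plus zip with a single dict comprehension that computes each agent's bit positionally as (central_action >> i) % 2; the range over agents both truncates extra bits and supplies padding zeros automatically.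
import Mathlib
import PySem

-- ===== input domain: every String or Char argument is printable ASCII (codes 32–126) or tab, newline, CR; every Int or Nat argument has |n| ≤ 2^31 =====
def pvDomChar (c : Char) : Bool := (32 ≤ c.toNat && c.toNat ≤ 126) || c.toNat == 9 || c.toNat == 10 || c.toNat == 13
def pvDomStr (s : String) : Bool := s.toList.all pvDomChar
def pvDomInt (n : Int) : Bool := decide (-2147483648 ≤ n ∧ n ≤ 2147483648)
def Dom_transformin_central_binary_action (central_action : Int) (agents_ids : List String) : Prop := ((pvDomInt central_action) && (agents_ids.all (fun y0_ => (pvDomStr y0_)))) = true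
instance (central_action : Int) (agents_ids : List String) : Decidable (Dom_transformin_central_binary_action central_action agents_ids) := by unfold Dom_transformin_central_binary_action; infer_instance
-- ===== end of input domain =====

-- B replaces A's divide-by-2 accumulation + padding loops + zip by a positional-bit dict
-- comprehension (idiomatic); equivalence is scoped by Pre_ to 0 ≤ central_action, where A terminates.


-- ===== PORT A =====
-- first while loop: divide by 2, accumulate remainders
def pvA_divloop (central_action : Int) (modulos : List Int) : List Int :=
  if central_action = 0 then modulos
  else if _h : 0 < central_action then
    pvA_divloop (PySem.Int.floordiv central_action 2) (modulos ++ [PySem.Int.mod central_action 2])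
  else modulos   -- Python loops forever here (central_action < 0); excluded by Pre_
termination_by central_action.toNat
decreasing_by
  rw [PySem.Int.floordiv_eq_ediv_of_pos (by omega : (0:Int) < 2)]
  omega

-- second while loop: pad with zeros up to len(agents_ids)
def pvA_pad (modulos : List Int) (n : Nat) : List Int :=
  if modulos.length < n then pvA_pad (modulos ++ [0]) n else modulos
termination_by n - modulos.length
decreasing_by simp; omega

def transformin_central_binary_action (central_action : Int) (agents_ids : List String) : List (String × Int) :=
  (PySem.Dict.ofList (agents_ids.zip (pvA_pad (pvA_divloop central_action []) agents_ids.length))).items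

-- ===== PORT B =====
def transformin_central_binary_action_alt (central_action : Int) (agents_ids : List String) : List (String × Int) :=
  (PySem.Dict.ofList ((PySem.List.enumerate agents_ids).map
    (fun p => (p.2, PySem.Int.mod (Int.shiftRight central_action p.1.toNat) 2)))).items

-- ===== PRECONDITION & SPEC =====
-- A's divide-by-2 loop never terminates for negative central_action, so equivalence is claimed for 0 ≤ central_action.
def Pre_transformin_central_binary_action (central_action : Int) (agents_ids : List String) : Prop := 0 ≤ central_action
instance (central_action : Int) (agents_ids : List String) : Decidable (Pre_transformin_central_binary_action central_action agents_ids) := by unfold Pre_transformin_central_binary_action; infer_instance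
def pvWitness_transformin_central_binary_action : Int × List String := (5, ["a", "b", "c"])

def Spec_transformin_central_binary_action (central_action : Int) (agents_ids : List String) (out : List (String × Int)) : Prop := out = transformin_central_binary_action_alt central_action agents_ids
instance (central_action : Int) (agents_ids : List String) (out : List (String × Int)) : Decidable (Spec_transformin_central_binary_action central_action agents_ids out) := by unfold Spec_transformin_central_binary_action; infer_instance

-- ===== CLAIM (what is proved, stated in full; the proofs are below) =====
def Claim_equal_transformin_central_binary_action : Prop := ∀ (central_action : Int) (agents_ids : List String), Dom_transformin_central_binary_action central_action agents_ids → Pre_transformin_central_binary_action central_action agents_ids → Spec_transformin_central_binary_action central_action agents_ids (transformin_central_binary_action central_action agents_ids)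
-- ===== LEMMAS AND PROOFS =====

-- the accumulator is only ever appended to
theorem pvA_divloop_append_aux (n : Nat) : ∀ (ca : Int), ca.toNat ≤ n → ∀ m,
    pvA_divloop ca m = m ++ pvA_divloop ca [] := by
  induction n with
  | zero =>
      intro ca hca m
      rw [pvA_divloop]; conv_rhs => rw [pvA_divloop]
      have hnp : ¬ 0 < ca := by omega
      by_cases h0 : ca = 0 <;> simp [h0, hnp]
  | succ n ih =>
      intro ca hca m
      rw [pvA_divloop]; conv_rhs => rw [pvA_divloop]
      by_cases h0 : ca = 0
      · simp [h0]
      · by_cases hp : 0 < ca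
        · simp only [h0, if_false, dif_pos hp]
          have hle : (PySem.Int.floordiv ca 2).toNat ≤ n := by
            rw [PySem.Int.floordiv_eq_ediv_of_pos (by omega : (0:Int) < 2)]; omega
          rw [ih _ hle (m ++ [PySem.Int.mod ca 2]), ih _ hle ([] ++ [PySem.Int.mod ca 2])]
          simp
        · simp [h0, hp]

theorem pvA_divloop_append (ca : Int) (m : List Int) :
    pvA_divloop ca m = m ++ pvA_divloop ca [] :=
  pvA_divloop_append_aux ca.toNat ca le_rfl m

-- bit characterisation of the remainder list
theorem pvA_divloop_getD_aux (n : Nat) : ∀ (ca : Int), ca.toNat ≤ n → 0 ≤ ca → ∀ i,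
    (pvA_divloop ca []).getD i 0 = PySem.Int.mod (PySem.Int.floordiv ca ((2:Int) ^ i)) 2 := by
  induction n with
  | zero =>
      intro ca hca h0 i
      have : ca = 0 := by omega
      subst this
      rw [pvA_divloop]
      simp
  | succ n ih =>
      intro ca hca h i
      by_cases h0 : ca = 0
      · subst h0
        rw [pvA_divloop]
        simp
      · have hpos : 0 < ca := lt_of_le_of_ne h (Ne.symm h0)
        rw [pvA_divloop]
        simp only [h0, if_false, dif_pos hpos]
        rw [pvA_divloop_append]
        simp only [List.nil_append, List.singleton_append]
        cases i with
        | zero =>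
            simp
        | succ i =>
            rw [List.getD_cons_succ]
            have hle : 0 ≤ PySem.Int.floordiv ca 2 := by
              rw [PySem.Int.floordiv_eq_ediv_of_pos (by omega : (0:Int) < 2)]; omega
            have hn : (PySem.Int.floordiv ca 2).toNat ≤ n := by
              rw [PySem.Int.floordiv_eq_ediv_of_pos (by omega : (0:Int) < 2)]; omega
            rw [ih _ hn hle i]
            congr 1
            rw [PySem.Int.floordiv_eq_ediv_of_pos (by omega : (0:Int) < 2),
                PySem.Int.floordiv_eq_ediv_of_pos (by positivity : (0:Int) < 2 ^ i),
                PySem.Int.floordiv_eq_ediv_of_pos (by positivity : (0:Int) < 2 ^ (i + 1))]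
            rw [Int.ediv_ediv_of_nonneg (by omega)]
            ring_nf

theorem pvA_divloop_getD (central_action : Int) (h : 0 ≤ central_action) (i : Nat) :
    (pvA_divloop central_action []).getD i 0
      = PySem.Int.mod (PySem.Int.floordiv central_action ((2:Int) ^ i)) 2 :=
  pvA_divloop_getD_aux central_action.toNat central_action le_rfl h i

theorem pvA_pad_getD (modulos : List Int) (n : Nat) (i : Nat) :
    (pvA_pad modulos n).getD i 0 = modulos.getD i 0 := by
  fun_induction pvA_pad modulos n with
  | case1 m h ih =>
      rw [ih]
      rcases lt_trichotomy i m.length with hi | hi | hi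
      · simp [List.getD, List.getElem?_append_left hi]
      · subst hi; simp [List.getD]
      · simp [List.getD, List.getElem?_eq_none (show m.length ≤ i by omega),
              List.getElem?_eq_none (show (m ++ [0]).length ≤ i by simp; omega)]
  | case2 m h => rfl

theorem pvA_pad_length (modulos : List Int) (n : Nat) : n ≤ (pvA_pad modulos n).length := by
  fun_induction pvA_pad modulos n with
  | case1 m h ih => exact ih
  | case2 m h => omega

theorem pv_zip_eq (central_action : Int) (agents_ids : List String)
    (h : 0 ≤ central_action) :
    agents_ids.zip (pvA_pad (pvA_divloop central_action []) agents_ids.length)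
      = (PySem.List.enumerate agents_ids).map
          (fun p => (p.2, PySem.Int.mod (Int.shiftRight central_action p.1.toNat) 2)) := by
  have hlen := pvA_pad_length (pvA_divloop central_action []) agents_ids.length
  apply List.ext_getElem
  · simp [PySem.List.length_enumerate]; omega
  · intro i h1 h2
    have hi : i < agents_ids.length := by simp at h1; omega
    have hip : i < (pvA_pad (pvA_divloop central_action []) agents_ids.length).length := by omega
    simp only [List.getElem_zip, List.getElem_map, PySem.List.getElem_enumerate]
    have : (pvA_pad (pvA_divloop central_action []) agents_ids.length)[i]
        = (pvA_pad (pvA_divloop central_action []) agents_ids.length).getD i 0 := by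
      simp [List.getD, List.getElem?_eq_getElem hip]
    rw [this, pvA_pad_getD, pvA_divloop_getD _ h]
    congr 1
    have ht : ((0:Int) + (i:Int)).toNat = i := by omega
    rw [PySem.Int.floordiv_eq_ediv_of_pos (by positivity : (0:Int) < 2 ^ i), ht,
        show Int.shiftRight central_action i = central_action >>> i from rfl,
        Int.shiftRight_eq_div_pow]
    norm_cast

-- ===== VERDICT (by name: the statement is the Claim_ definition above) =====
theorem transformin_central_binary_action_spec : Claim_equal_transformin_central_binary_action := by
  intro central_action agents_ids _ hpre
  unfold Spec_transformin_central_binary_action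
  unfold transformin_central_binary_action transformin_central_binary_action_alt
  rw [pv_zip_eq central_action agents_ids hpre]
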